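-- pv_equiv track=rewrite | github.com/Rikri4009/rd_matchmaking_bot | src/rd_matchmaking_bot/utils/ascension.py | get_relic_slots
-- ===== SOURCE A (Python) =====
-- def get_relic_slots(relic_information, runner_owned_relics):
--     user_relic_count = 0
--
--     for relic_type in relic_information.keys():
--         for relic in relic_information[relic_type].keys():
--             if relic in runner_owned_relics:
--                 user_relic_count = user_relic_count + runner_owned_relics[relic]
--
--     runner_relic_slots = 1
--     if user_relic_count >= 7:
--         runner_relic_slots = 2
--
--     return runner_relic_slots
-- ===== SOURCE B (Python) =====
-- def get_relic_slots(relic_information, runner_owned_relics):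
--     # Owned-driven nested scan: for each owned relic, count in how many relic_type
--     # catalogues it appears, and weight its owned count by that multiplicity.
--     total = sum(
--         count * sum(1 for type_dict in relic_information.values() if relic in type_dict)
--         for relic, count in runner_owned_relics.items()
--     )
--     return 2 if total >= 7 else 1
-- ===== Notes on version B (the rewrite author's own statement) =====
-- stated objective: alternative
-- what changed: B inverts the traversal: instead of scanning every catalogued relic and testing membership in the owned dict, it iterates the owned-relics dict and for each owned relic counts the number of relic_type catalogues listing it, summing count times that multiplicity.
import Mathlib
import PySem

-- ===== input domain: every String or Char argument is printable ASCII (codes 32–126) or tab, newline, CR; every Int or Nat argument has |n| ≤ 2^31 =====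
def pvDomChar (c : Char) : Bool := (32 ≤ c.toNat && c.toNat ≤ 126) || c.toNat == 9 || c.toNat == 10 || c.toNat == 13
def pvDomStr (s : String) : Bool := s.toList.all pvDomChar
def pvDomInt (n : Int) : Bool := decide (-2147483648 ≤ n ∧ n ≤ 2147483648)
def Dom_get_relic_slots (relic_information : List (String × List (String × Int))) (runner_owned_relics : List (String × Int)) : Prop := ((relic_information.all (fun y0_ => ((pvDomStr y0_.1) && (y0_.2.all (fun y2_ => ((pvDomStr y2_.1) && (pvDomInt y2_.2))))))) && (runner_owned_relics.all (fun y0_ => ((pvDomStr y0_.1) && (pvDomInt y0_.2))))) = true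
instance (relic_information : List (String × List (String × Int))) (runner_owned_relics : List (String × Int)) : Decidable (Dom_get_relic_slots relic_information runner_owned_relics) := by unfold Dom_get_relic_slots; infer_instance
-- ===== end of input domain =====

-- B inverts the traversal: the owned-relics dict drives the loop and each owned relic's
-- count is weighted by the number of relic_type catalogues listing it (alternative decomposition).

-- ===== PORT A =====
-- A: iterate the catalogue's type dicts, for each catalogued relic test membership in
-- the owned dict and add its owned count; return 2 if the total reaches 7, else 1.
def get_relic_slots (relic_information : List (String × List (String × Int))) (runner_owned_relics : List (String × Int)) : Int :=
  let riD := PySem.Dict.ofList relic_information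
  let rorD := PySem.Dict.ofList runner_owned_relics
  let user_relic_count :=
    riD.keys.foldl (fun acc relic_type =>
      (PySem.Dict.ofList (riD.getD relic_type [])).keys.foldl
        (fun acc relic =>
          if rorD.contains relic then acc + rorD.getD relic 0 else acc) acc) 0
  if user_relic_count ≥ 7 then 2 else 1

-- ===== PORT B =====
-- B: one pass over the owned dict; for each owned relic, count the type catalogues
-- containing it (a filter-length over the catalogue's values) and weight by it.
def get_relic_slots_alt (relic_information : List (String × List (String × Int))) (runner_owned_relics : List (String × Int)) : Int :=
  let total :=
    (((PySem.Dict.ofList runner_owned_relics).items).map (fun p =>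
      p.2 * ((((PySem.Dict.ofList relic_information).values).filter
                (fun type_dict => (PySem.Dict.ofList type_dict).contains p.1)).length : Int))).sum
  if total ≥ 7 then 2 else 1

-- ===== PRECONDITION & SPEC =====
def Spec_get_relic_slots (relic_information : List (String × List (String × Int))) (runner_owned_relics : List (String × Int)) (out : Int) : Prop := out = get_relic_slots_alt relic_information runner_owned_relics
instance (relic_information : List (String × List (String × Int))) (runner_owned_relics : List (String × Int)) (out : Int) : Decidable (Spec_get_relic_slots relic_information runner_owned_relics out) := by unfold Spec_get_relic_slots; infer_instance

-- ===== CLAIM =====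
def Claim_equal_get_relic_slots : Prop := ∀ (relic_information : List (String × List (String × Int))) (runner_owned_relics : List (String × Int)), Dom_get_relic_slots relic_information runner_owned_relics → Spec_get_relic_slots relic_information runner_owned_relics (get_relic_slots relic_information runner_owned_relics)

-- ===== LEMMAS AND PROOFS =====

-- A's inner loop: adding rorD[relic] for catalogued relics present in rorD is adding
-- rorD.getD relic 0 unconditionally (absent relics contribute the default 0).
lemma pvInnerSum (rorD : PySem.Dict String Int) (ks : List String) (acc : Int) :
    ks.foldl (fun acc relic => if rorD.contains relic then acc + rorD.getD relic 0 else acc) acc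
      = acc + (ks.map (fun k => rorD.getD k 0)).sum := by
  induction ks generalizing acc with
  | nil => simp
  | cons k ks ih =>
    simp only [List.foldl_cons, List.map_cons, List.sum_cons, ih]
    cases h : rorD.contains k with
    | true => simp only [if_true]; ring
    | false => rw [PySem.Dict.getD_of_not_contains _ _ h]; simp

-- Sum of the values whose key equals k, over an assoc list with distinct keys,
-- is the dict lookup.
lemma sum_ite_eq_getD (k : String) (ps : List (String × Int)) (hnd : (ps.map Prod.fst).Nodup) :
    (ps.map (fun p => if p.1 = k then p.2 else 0)).sum = (PySem.Dict.mk ps).getD k 0 := by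
  induction ps with
  | nil => simp [PySem.Dict.getD_eq_get?_getD, PySem.Dict.get?]
  | cons p ps ih =>
    simp only [List.map_cons, List.sum_cons, List.nodup_cons] at hnd ⊢
    rw [PySem.Dict.getD_eq_get?_getD, PySem.Dict.get?_mk_cons]
    by_cases h : p.1 = k
    · subst h
      simp only [beq_self_eq_true, if_pos, Option.getD_some]
      have : (ps.map (fun q => if q.1 = p.1 then q.2 else 0)).sum = 0 := by
        apply List.sum_eq_zero
        intro x hx
        obtain ⟨q, hq, rfl⟩ := List.mem_map.mp hx
        have : q.1 ≠ p.1 := fun he => hnd.1 (he ▸ List.mem_map_of_mem hq)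
        simp [this]
      omega
    · have hb : (p.1 == k) = false := beq_eq_false_iff_ne.mpr h
      rw [if_neg h, hb, if_neg (by simp), ih hnd.2, PySem.Dict.getD_eq_get?_getD]
      omega

-- The exchange of summation: summing rorD-lookups over the flattened key list K
-- equals summing count * multiplicity over rorD's items.
lemma core (K : List String) (ps : List (String × Int)) (hnd : (ps.map Prod.fst).Nodup) :
    (K.map (fun k => (PySem.Dict.mk ps).getD k 0)).sum
      = (ps.map (fun p => p.2 * (K.count p.1 : Int))).sum := by
  induction K with
  | nil => simp
  | cons k K ih =>
    simp only [List.map_cons, List.sum_cons, ih]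
    have : ∀ p : String × Int,
        p.2 * ((k :: K).count p.1 : Int)
          = (if p.1 = k then p.2 else 0) + p.2 * (K.count p.1 : Int) := by
      intro p
      rw [List.count_cons]
      by_cases h : p.1 = k
      · simp [h]; ring
      · have hb' : (k == p.1) = false := beq_eq_false_iff_ne.mpr (Ne.symm h)
        simp only [if_neg h, hb']
        simp
    simp only [this]
    rw [List.sum_map_add, sum_ite_eq_getD k ps hnd]

-- Multiplicity of v in the flattened (deduped) key lists = number of type dicts containing v.
lemma count_flatMap_keys (L : List (List (String × Int))) (v : String) :
    (L.flatMap (fun td => (PySem.Dict.ofList td).keys)).count v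
      = (L.filter (fun td => (PySem.Dict.ofList td).contains v)).length := by
  induction L with
  | nil => simp
  | cons td L ih =>
    simp only [List.flatMap_cons, List.count_append, List.filter_cons, ih]
    cases h : (PySem.Dict.ofList td).contains v with
    | true =>
      have hmem : v ∈ (PySem.Dict.ofList td).keys :=
        (PySem.Dict.contains_iff_mem_keys _ _).mp h
      have hnd : (PySem.Dict.ofList td).keys.Nodup := PySem.Dict.nodup_keys_ofList td
      have : (PySem.Dict.ofList td).keys.count v = 1 :=
        List.count_eq_one_of_mem hnd hmem
      simp [this]
      omega
    | false =>
      have hnm : v ∉ (PySem.Dict.ofList td).keys := fun hm =>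
        by simp [(PySem.Dict.contains_iff_mem_keys _ _).mpr hm] at h
      simp [List.count_eq_zero.mpr hnm]

-- values as lookups over keys (for the A-side outer loop rewrite)
lemma keys_map_getD (d : PySem.Dict String (List (String × Int))) (hnd : d.keys.Nodup)
    (f : List (String × Int) → Int) :
    d.keys.map (fun t => f (d.getD t [])) = d.values.map f := by
  rw [PySem.Dict.values_eq_map_keys d hnd ([] : List (String × Int))]
  simp [Function.comp]

-- ===== VERDICT =====
theorem get_relic_slots_spec : Claim_equal_get_relic_slots := by
  intro ri ror _
  unfold Spec_get_relic_slots get_relic_slots get_relic_slots_alt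
  simp only []
  set riD := PySem.Dict.ofList ri with hri
  set rorD := PySem.Dict.ofList ror with hror
  -- A's count = sum of owned lookups over the flattened key list
  have hA : riD.keys.foldl (fun acc relic_type =>
      (PySem.Dict.ofList (riD.getD relic_type [])).keys.foldl
        (fun acc relic => if rorD.contains relic then acc + rorD.getD relic 0 else acc) acc) 0
      = ((riD.values.flatMap (fun td => (PySem.Dict.ofList td).keys)).map
          (fun k => rorD.getD k 0)).sum := by
    have h1 : riD.keys.foldl (fun acc relic_type =>
        (PySem.Dict.ofList (riD.getD relic_type [])).keys.foldl
          (fun acc relic => if rorD.contains relic then acc + rorD.getD relic 0 else acc) acc) 0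
        = 0 + (riD.keys.map (fun t =>
            (((PySem.Dict.ofList (riD.getD t [])).keys).map (fun k => rorD.getD k 0)).sum)).sum := by
      rw [← PySem.List.foldl_add]
      apply PySem.List.foldl_congr_mem
      intro acc t _
      exact pvInnerSum rorD _ acc
    rw [h1, zero_add,
      keys_map_getD riD (PySem.Dict.nodup_keys_ofList ri)
        (fun td => (((PySem.Dict.ofList td).keys).map (fun k => rorD.getD k 0)).sum)]
    rw [List.map_flatMap, List.flatMap_def, List.sum_flatten, List.map_map]
    rfl
  rw [hA]
  have hnd : (rorD.items.map Prod.fst).Nodup := PySem.Dict.nodup_keys_ofList ror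
  rw [core (riD.values.flatMap (fun td => (PySem.Dict.ofList td).keys)) rorD.items hnd]
  have : ∀ p : String × Int, p.2 *
        (((riD.values.flatMap (fun td => (PySem.Dict.ofList td).keys)).count p.1 : Int))
      = p.2 * (((riD.values.filter (fun td => (PySem.Dict.ofList td).contains p.1)).length : Int)) := by
    intro p
    rw [count_flatMap_keys]
  simp only [this]
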